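-- pv_equiv track=rewrite | github.com/Atledbet11/DiamondsPolyCalc | DiamondsPolyCalc.py | bernoulliTriangleBuilder
-- ===== SOURCE A (Python) =====
-- def bernoulliTriangleBuilder(dimension):
--
--     # Declare output list
--     outputList = []
--
--     # For I less than the dimension size
--     for i in range(dimension):
--
--         # Define a temporary holding list
--         tempList = []
--
--         # For j less than the size I
--         for j in range(i+1):
--
--             # If j is the first or last element in the array.
--             if j == i or j == 0:
--
--                 # Append a 1 to the list
--                 tempList.append(1)
--
--             # Otherwise Calculate the value
--             else:
--
--                 # The value is always the previous entry in the outputlist of j + j-1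
--                 tempList.append(outputList[i-1][j] + outputList[i-1][j-1])
--
--         # Append the row to the list.
--         outputList.append(tempList)
--
--     return outputList
-- ===== SOURCE B (Python) =====
-- def bernoulliTriangleBuilder(dimension):
--     # Each row is built from a single running binomial coefficient
--     # (multiplied before integer division, so every intermediate is exact),
--     # never consulting the previously stored row.
--     outputList = []
--     for i in range(dimension):
--         row = []
--         c = 1
--         for j in range(i + 1):
--             row.append(c)
--             c = c * (i - j) // (j + 1)
--         outputList.append(row)
--     return outputList
-- ===== Notes on version B (the rewrite author's own statement) =====
-- stated objective: alternative
-- what changed: Each row is computed independently via the multiplicative binomial formula with one running coefficient (c = c*(i-j)//(j+1)), instead of summing two entries of the previously stored row.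
import Mathlib
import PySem

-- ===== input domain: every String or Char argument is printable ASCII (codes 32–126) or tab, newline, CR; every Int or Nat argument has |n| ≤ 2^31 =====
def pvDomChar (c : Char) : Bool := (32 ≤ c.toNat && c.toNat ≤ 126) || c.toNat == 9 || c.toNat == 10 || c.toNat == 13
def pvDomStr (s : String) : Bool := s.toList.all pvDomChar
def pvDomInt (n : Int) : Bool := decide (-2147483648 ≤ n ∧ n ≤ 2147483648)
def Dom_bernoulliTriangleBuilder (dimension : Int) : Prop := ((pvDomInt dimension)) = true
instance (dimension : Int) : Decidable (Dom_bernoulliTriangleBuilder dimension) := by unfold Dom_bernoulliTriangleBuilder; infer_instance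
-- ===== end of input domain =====

-- B builds each row with one running multiplicative binomial coefficient instead of
-- Pascal-summing the previously stored row; alternative decomposition, same cost.

-- ===== PORT A =====
def bernoulliTriangleBuilder (dimension : Int) : List (List Int) :=
  (PySem.List.pyRange 0 dimension 1).foldl
    (fun outputList i =>
      let tempList := (PySem.List.pyRange 0 (i + 1) 1).foldl
        (fun tempList j =>
          if j == i || j == 0 then tempList ++ [(1 : Int)]
          else tempList ++ [PySem.List.pyGetD (PySem.List.pyGetD outputList (i - 1) []) j 0
                          + PySem.List.pyGetD (PySem.List.pyGetD outputList (i - 1) []) (j - 1) 0])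
        []
      outputList ++ [tempList])
    []

-- ===== PORT B =====
def bernoulliTriangleBuilder_alt (dimension : Int) : List (List Int) :=
  (PySem.List.pyRange 0 dimension 1).foldl
    (fun outputList i =>
      let rc := (PySem.List.pyRange 0 (i + 1) 1).foldl
        (fun (rc : List Int × Int) j =>
          (rc.1 ++ [rc.2], PySem.Int.floordiv (rc.2 * (i - j)) (j + 1)))
        ([], 1)
      outputList ++ [rc.1])
    []

-- ===== PRECONDITION & SPEC =====
def Spec_bernoulliTriangleBuilder (dimension : Int) (out : List (List Int)) : Prop := out = bernoulliTriangleBuilder_alt dimension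
instance (dimension : Int) (out : List (List Int)) : Decidable (Spec_bernoulliTriangleBuilder dimension out) := by unfold Spec_bernoulliTriangleBuilder; infer_instance

-- ===== CLAIM (what is proved, stated in full; the proofs are below) =====
def Claim_equal_bernoulliTriangleBuilder : Prop := ∀ (dimension : Int), Dom_bernoulliTriangleBuilder dimension → Spec_bernoulliTriangleBuilder dimension (bernoulliTriangleBuilder dimension)

-- ===== LEMMAS AND PROOFS =====

-- row i of Pascal's triangle, and the first n rows
def pvRow (i : Nat) : List Int := (List.range (i + 1)).map (fun j => ((i.choose j : Nat) : Int))
def pvTri (n : Nat) : List (List Int) := (List.range n).map pvRow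

lemma pvTri_getD (n : Nat) (hn : 0 < n) :
    PySem.List.pyGetD (pvTri n) ((n : Int) - 1) [] = pvRow (n - 1) := by
  have h : ((n : Int) - 1) = ((n - 1 : Nat) : Int) := by omega
  rw [h, PySem.List.pyGetD_natCast, pvTri, List.getD_eq_getElem?_getD]
  simp [List.getElem?_map, List.getElem?_range, Nat.sub_lt hn]

-- B's inner loop: running coefficient c = choose i j
lemma B_inner (i : Nat) : ∀ (k a : Nat), k = i + 1 - a → a ≤ i + 1 →
    ((PySem.List.pyRange (a : Int) ((i : Int) + 1) 1).foldl
      (fun (rc : List Int × Int) j =>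
        (rc.1 ++ [rc.2], PySem.Int.floordiv (rc.2 * ((i : Int) - j)) (j + 1)))
      ((List.range a).map (fun j => ((i.choose j : Nat) : Int)), ((i.choose a : Nat) : Int)))
    = ((List.range (i + 1)).map (fun j => ((i.choose j : Nat) : Int)), ((i.choose (i + 1) : Nat) : Int)) := by
  intro k
  induction k with
  | zero =>
    intro a hk ha
    have ha' : a = i + 1 := by omega
    subst ha'
    rw [PySem.List.pyRange_one_eq_nil (by push_cast; omega)]
    simp
  | succ k ih =>
    intro a hk ha
    have hai : a ≤ i := by omega
    rw [PySem.List.pyRange_one_cons (by push_cast; omega)]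
    rw [List.foldl_cons]
    have hsub : (i : Int) - (a : Int) = ((i - a : Nat) : Int) := by omega
    have hdiv : PySem.Int.floordiv (((i.choose a : Nat) : Int) * ((i : Int) - (a : Int))) ((a : Int) + 1)
        = ((i.choose (a + 1) : Nat) : Int) := by
      rw [hsub]
      have h1 : ((i.choose a : Nat) : Int) * ((i - a : Nat) : Int) = ((i.choose a * (i - a) : Nat) : Int) := by
        push_cast; ring
      have h2 : ((a : Int) + 1) = ((a + 1 : Nat) : Int) := by push_cast; ring
      rw [h1, h2, PySem.Int.floordiv_natCast]
      congr 1
      rw [← Nat.choose_succ_right_eq]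
      exact Nat.mul_div_cancel _ (Nat.succ_pos a)
    have hrow : (List.range a).map (fun j => ((i.choose j : Nat) : Int)) ++ [((i.choose a : Nat) : Int)]
        = (List.range (a + 1)).map (fun j => ((i.choose j : Nat) : Int)) := by
      rw [List.range_succ, List.map_append]; rfl
    have hcast : (a : Int) + 1 = ((a + 1 : Nat) : Int) := by push_cast; ring
    simp only [hdiv, hrow]
    rw [hcast]
    exact ih (a + 1) (by omega) (by omega)

-- A's inner loop: Pascal sums over the previous reference row
lemma A_inner (i : Nat) (out : List (List Int))
    (hprev : 0 < i → PySem.List.pyGetD out ((i : Int) - 1) [] = pvRow (i - 1)) :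
    ∀ (k a : Nat), k = i + 1 - a → a ≤ i + 1 →
    ((PySem.List.pyRange (a : Int) ((i : Int) + 1) 1).foldl
      (fun tempList j =>
        if j == (i : Int) || j == 0 then tempList ++ [(1 : Int)]
        else tempList ++ [PySem.List.pyGetD (PySem.List.pyGetD out ((i : Int) - 1) []) j 0
                        + PySem.List.pyGetD (PySem.List.pyGetD out ((i : Int) - 1) []) (j - 1) 0])
      ((List.range a).map (fun j => ((i.choose j : Nat) : Int))))
    = (List.range (i + 1)).map (fun j => ((i.choose j : Nat) : Int)) := by
  intro k
  induction k with
  | zero =>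
    intro a hk ha
    have ha' : a = i + 1 := by omega
    subst ha'
    rw [PySem.List.pyRange_one_eq_nil (by push_cast; omega)]
    rfl
  | succ k ih =>
    intro a hk ha
    have hai : a ≤ i := by omega
    rw [PySem.List.pyRange_one_cons (by push_cast; omega), List.foldl_cons]
    have hrow : ∀ v : Int, v = ((i.choose a : Nat) : Int) →
        (List.range a).map (fun j => ((i.choose j : Nat) : Int)) ++ [v]
        = (List.range (a + 1)).map (fun j => ((i.choose j : Nat) : Int)) := by
      intro v hv; rw [hv, List.range_succ, List.map_append]; rfl
    have hstep :
        (if (a : Int) == (i : Int) || (a : Int) == 0 then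
          (List.range a).map (fun j => ((i.choose j : Nat) : Int)) ++ [(1 : Int)]
        else (List.range a).map (fun j => ((i.choose j : Nat) : Int)) ++
          [PySem.List.pyGetD (PySem.List.pyGetD out ((i : Int) - 1) []) (a : Int) 0
          + PySem.List.pyGetD (PySem.List.pyGetD out ((i : Int) - 1) []) ((a : Int) - 1) 0])
        = (List.range (a + 1)).map (fun j => ((i.choose j : Nat) : Int)) := by
      by_cases hcase : a = i ∨ a = 0
      · have hb : ((a : Int) == (i : Int) || (a : Int) == 0) = true := by
          rcases hcase with h | h <;> subst h <;> simp
        rw [hb, if_pos rfl]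
        apply hrow
        rcases hcase with h | h <;> subst h <;> simp
      · push_neg at hcase
        obtain ⟨hne, hnz⟩ := hcase
        have hb : ((a : Int) == (i : Int) || (a : Int) == 0) = false := by
          simp only [Bool.or_eq_false_iff, beq_eq_false_iff_ne, ne_eq]
          constructor <;> intro h <;> [exact hne (by exact_mod_cast h); exact hnz (by exact_mod_cast h)]
        rw [hb, if_neg (by simp)]
        have hi : 0 < i := by omega
        rw [hprev hi]
        have h1 : PySem.List.pyGetD (pvRow (i - 1)) (a : Int) 0 = (((i - 1).choose a : Nat) : Int) := by
          rw [PySem.List.pyGetD_natCast, pvRow, List.getD_eq_getElem?_getD]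
          simp [List.getElem?_map, List.getElem?_range, show a < i - 1 + 1 by omega]
        have h2 : PySem.List.pyGetD (pvRow (i - 1)) ((a : Int) - 1) 0 = (((i - 1).choose (a - 1) : Nat) : Int) := by
          have hc : (a : Int) - 1 = ((a - 1 : Nat) : Int) := by omega
          rw [hc, PySem.List.pyGetD_natCast, pvRow, List.getD_eq_getElem?_getD]
          simp [List.getElem?_map, List.getElem?_range, show a - 1 < i - 1 + 1 by omega]
        rw [h1, h2]
        apply hrow
        have hpascal : i.choose a = (i - 1).choose (a - 1) + (i - 1).choose a := by
          obtain ⟨i', rfl⟩ : ∃ i', i = i' + 1 := ⟨i - 1, by omega⟩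
          obtain ⟨a', rfl⟩ : ∃ a', a = a' + 1 := ⟨a - 1, by omega⟩
          simpa using Nat.choose_succ_succ i' a'
        push_cast [hpascal]; ring
    rw [hstep]
    have hcast : (a : Int) + 1 = ((a + 1 : Nat) : Int) := by push_cast; ring
    rw [hcast]
    exact ih (a + 1) (by omega) (by omega)

-- outer loops
lemma A_outer (n : Nat) :
    (PySem.List.pyRange 0 (n : Int) 1).foldl
      (fun outputList i =>
        let tempList := (PySem.List.pyRange 0 (i + 1) 1).foldl
          (fun tempList j =>
            if j == i || j == 0 then tempList ++ [(1 : Int)]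
            else tempList ++ [PySem.List.pyGetD (PySem.List.pyGetD outputList (i - 1) []) j 0
                            + PySem.List.pyGetD (PySem.List.pyGetD outputList (i - 1) []) (j - 1) 0])
          []
        outputList ++ [tempList])
      [] = pvTri n := by
  induction n with
  | zero => simp [PySem.List.pyRange_one_eq_nil, pvTri]
  | succ n ih =>
    rw [show ((n + 1 : Nat) : Int) = (n : Int) + 1 by push_cast; ring,
      PySem.List.pyRange_one_succ_right (by positivity), List.foldl_append, ih]
    simp only [List.foldl_cons, List.foldl_nil]
    have := A_inner n (pvTri n) (fun h => pvTri_getD n h) (n + 1) 0 (by omega) (by omega)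
    simp only [Nat.cast_zero, List.range_zero, List.map_nil] at this
    rw [this]
    simp [pvTri, pvRow, List.range_succ]

lemma B_outer (n : Nat) :
    (PySem.List.pyRange 0 (n : Int) 1).foldl
      (fun outputList i =>
        let rc := (PySem.List.pyRange 0 (i + 1) 1).foldl
          (fun (rc : List Int × Int) j =>
            (rc.1 ++ [rc.2], PySem.Int.floordiv (rc.2 * (i - j)) (j + 1)))
          ([], 1)
        outputList ++ [rc.1])
      [] = pvTri n := by
  induction n with
  | zero => simp [PySem.List.pyRange_one_eq_nil, pvTri]
  | succ n ih =>
    rw [show ((n + 1 : Nat) : Int) = (n : Int) + 1 by push_cast; ring,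
      PySem.List.pyRange_one_succ_right (by positivity), List.foldl_append, ih]
    simp only [List.foldl_cons, List.foldl_nil]
    have := B_inner n (n + 1) 0 (by omega) (by omega)
    simp only [Nat.cast_zero, List.range_zero, List.map_nil, Nat.choose_zero_right,
      Nat.cast_one] at this
    rw [this]
    simp [pvTri, pvRow, List.range_succ]

-- ===== VERDICT (by name: the statement is the Claim_ definition above) =====
theorem bernoulliTriangleBuilder_spec : Claim_equal_bernoulliTriangleBuilder := by
  intro dimension _
  unfold Spec_bernoulliTriangleBuilder bernoulliTriangleBuilder bernoulliTriangleBuilder_alt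
  by_cases h : dimension ≤ 0
  · rw [PySem.List.pyRange_one_eq_nil (by omega)]
    rfl
  · have hd : dimension = ((dimension.toNat : Nat) : Int) := by omega
    rw [hd, A_outer, B_outer]
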